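-- pv_equiv track=rewrite | github.com/Nicolas0016/Tecnicas-de-Diseno-de-Algoritmos-AED-III | Práctica/clase-2/ejercicio.py | es_valida
-- ===== SOURCE A (Python) =====
-- VOCALES = set("aeiouAEIOU")
--
-- CONSONANTES = set("bcdfghjklmnpqrstvwxyzBCDFGHJKLMNPQRSTVWXYZ")
--
-- LETRAS = VOCALES | CONSONANTES
--
-- def es_valida(cadena):
--     """Verifica si la cadena cumple todas las condiciones"""
--     # Condición 1: Contiene al menos una E/e
--     if 'e' not in cadena.lower():
--         return False
--
--     # Condición 2 y 3: No tener 3 vocales o 3 consonantes consecutivas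
--     if len(cadena) < 3:
--         return True
--
--     contador = 1
--     tipo_anterior = "vocal" if cadena[0] in VOCALES else "consonante" if cadena[0] in CONSONANTES else None
--
--     for i in range(1, len(cadena)):
--         if cadena[i] not in LETRAS:
--             continue
--
--         tipo_actual = "vocal" if cadena[i] in VOCALES else "consonante"
--
--         if tipo_anterior == tipo_actual:
--             contador += 1
--             if contador >= 3:
--                 return False
--         else:
--             contador = 1
--             tipo_anterior = tipo_actual
--
--     return True
-- ===== SOURCE B (Python) =====
-- VOCALES = set("aeiouAEIOU")
-- CONSONANTES = set("bcdfghjklmnpqrstvwxyzBCDFGHJKLMNPQRSTVWXYZ")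
-- LETRAS = VOCALES | CONSONANTES
--
-- def es_valida(cadena):
--     """Verifica si la cadena cumple todas las condiciones"""
--     if 'e' not in cadena.lower():
--         return False
--     tipos = [c in VOCALES for c in cadena if c in LETRAS]
--     return not any(a == b == c for a, b, c in zip(tipos, tipos[1:], tipos[2:]))
-- ===== Notes on version B (the rewrite author's own statement) =====
-- stated objective: idiomatic
-- what changed: Replaces A's manual contador/tipo_anterior state machine with a build-then-scan: filter the string to letters, map each to its vowel/consonant type, and detect a run of 3 by zipping the type list against its two shifts.
import Mathlib
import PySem

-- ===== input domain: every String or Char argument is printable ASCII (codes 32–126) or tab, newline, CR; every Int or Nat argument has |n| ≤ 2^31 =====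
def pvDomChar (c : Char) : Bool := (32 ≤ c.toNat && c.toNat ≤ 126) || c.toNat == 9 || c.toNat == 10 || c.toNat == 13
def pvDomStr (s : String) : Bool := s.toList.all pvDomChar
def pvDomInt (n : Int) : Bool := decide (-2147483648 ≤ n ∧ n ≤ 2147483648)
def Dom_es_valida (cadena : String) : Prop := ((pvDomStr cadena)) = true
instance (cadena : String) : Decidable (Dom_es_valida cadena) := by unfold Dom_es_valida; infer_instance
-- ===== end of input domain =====

-- B replaces A's manual contador/tipo_anterior state machine with a build-then-scan over
-- the filtered vowel/consonant type sequence (idiomatic; same cost).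

def pvVocales : List Char := "aeiouAEIOU".toList
def pvConsonantes : List Char := "bcdfghjklmnpqrstvwxyzBCDFGHJKLMNPQRSTVWXYZ".toList
def pvLetras : List Char := pvVocales ++ pvConsonantes

-- ===== PORT A =====
-- tipo_anterior = "vocal" if cadena[0] in VOCALES else "consonante" if cadena[0] in CONSONANTES else None
-- (some true = "vocal", some false = "consonante", none = None)
def pvTipo0 (c0 : Char) : Option Bool :=
  if pvVocales.contains c0 then some true
  else if pvConsonantes.contains c0 then some false
  else none

-- the 'for i in range(1, len(cadena))' loop with state (contador, tipo_anterior)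
def esValidaLoop (rest : List Char) (contador : Int) (tipo : Option Bool) : Bool :=
  match rest with
  | [] => true
  | c :: rs =>
    if ¬ pvLetras.contains c then esValidaLoop rs contador tipo
    else
      let tipoActual := pvVocales.contains c
      if tipo = some tipoActual then
        if contador + 1 ≥ 3 then false
        else esValidaLoop rs (contador + 1) tipo
      else esValidaLoop rs 1 (some tipoActual)

def es_valida (cadena : String) : Bool :=
  if ¬ PySem.Str.isIn "e" (PySem.Str.lower cadena) then false
  else if PySem.Str.len cadena < 3 then true
  else
    match cadena.toList with
    | [] => true  -- unreachable: len(cadena) ≥ 3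
    | c0 :: rs => esValidaLoop rs 1 (pvTipo0 c0)

-- ===== PORT B =====
-- tipos = [c in VOCALES for c in cadena if c in LETRAS]
def pvTypes (l : List Char) : List Bool :=
  (l.filter (fun c => pvLetras.contains c)).map (fun c => pvVocales.contains c)

-- any(a == b == c for a, b, c in zip(tipos, tipos[1:], tipos[2:]))
def pvScan (tipos : List Bool) : Bool :=
  ((tipos.zip (PySem.List.slice tipos (some 1) none)).zip
      (PySem.List.slice tipos (some 2) none)).any
    (fun p => p.1.1 == p.1.2 && p.1.2 == p.2)

def es_valida_alt (cadena : String) : Bool :=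
  if ¬ PySem.Str.isIn "e" (PySem.Str.lower cadena) then false
  else ! pvScan (pvTypes cadena.toList)

-- ===== PRECONDITION & SPEC =====
def Spec_es_valida (cadena : String) (out : Bool) : Prop := out = es_valida_alt cadena
instance (cadena : String) (out : Bool) : Decidable (Spec_es_valida cadena out) := by unfold Spec_es_valida; infer_instance

-- ===== CLAIM (what is proved, stated in full; the proofs are below) =====
def Claim_equal_es_valida : Prop := ∀ (cadena : String), Dom_es_valida cadena → Spec_es_valida cadena (es_valida cadena)

-- ===== LEMMAS AND PROOFS =====

-- "some three consecutive equal types" as a structural recursion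
def pvHasRun3 : List Bool → Bool
  | a :: b :: c :: rs => (a == b && b == c) || pvHasRun3 (b :: c :: rs)
  | _ => false

theorem pvTypes_cons_notLetter (c : Char) (l : List Char)
    (h : c ∉ pvLetras) : pvTypes (c :: l) = pvTypes l := by
  simp [pvTypes, h]

theorem pvTypes_cons_letter (c : Char) (l : List Char)
    (h : c ∈ pvLetras) :
    pvTypes (c :: l) = decide (c ∈ pvVocales) :: pvTypes l := by
  simp [pvTypes, h]

theorem pvHasRun3_short (xs : List Bool) (h : xs.length < 3) : pvHasRun3 xs = false := by
  match xs with
  | [] => rfl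
  | [a] => rfl
  | [a, b] => rfl
  | a :: b :: c :: rs => simp at h; omega

theorem pvHasRun3_cons_ne (t u : Bool) (xs : List Bool) (h : t ≠ u) :
    pvHasRun3 (t :: u :: xs) = pvHasRun3 (u :: xs) := by
  match xs with
  | [] => simp [pvHasRun3]
  | c :: rs => simp [pvHasRun3, h]

-- B's zip-triple scan computes pvHasRun3
theorem pvScan_eq (t : List Bool) : pvScan t = pvHasRun3 t := by
  unfold pvScan
  rw [show PySem.List.slice t (some 1) none = t.drop 1 by
        simpa using PySem.List.slice_from_natCast (xs := t) (a := 1),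
      show PySem.List.slice t (some 2) none = t.drop 2 by
        simpa using PySem.List.slice_from_natCast (xs := t) (a := 2)]
  induction t with
  | nil => rfl
  | cons a t ih =>
    match t with
    | [] => rfl
    | [b] => rfl
    | b :: c :: rs =>
      simp only [List.drop, List.zip_cons_cons, List.any_cons, pvHasRun3]
      simp only [List.drop, List.zip_cons_cons] at ih
      rw [ih]

-- A's loop, started in state (cnt, tipo), detects a run of 3 in the carried
-- prefix followed by the types of the remaining characters
theorem esValidaLoop_eq (rest : List Char) :
    (∀ t : Bool, esValidaLoop rest 1 (some t) = ! pvHasRun3 (t :: pvTypes rest)) ∧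
    (∀ t : Bool, esValidaLoop rest 2 (some t) = ! pvHasRun3 (t :: t :: pvTypes rest)) ∧
    (esValidaLoop rest 1 none = ! pvHasRun3 (pvTypes rest)) := by
  induction rest with
  | nil =>
    refine ⟨fun t => ?_, fun t => ?_, ?_⟩ <;>
      simp [esValidaLoop, pvTypes, pvHasRun3]
  | cons c rs ih =>
    obtain ⟨ih1, ih2, ih0⟩ := ih
    by_cases hL : c ∈ pvLetras
    · have htypes := pvTypes_cons_letter c rs hL
      refine ⟨fun t => ?_, fun t => ?_, ?_⟩
      · rw [htypes]
        by_cases htu : t = decide (c ∈ pvVocales)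
        · subst htu
          have e1 : esValidaLoop (c :: rs) 1 (some (decide (c ∈ pvVocales)))
              = esValidaLoop rs 2 (some (decide (c ∈ pvVocales))) := by
            norm_num [esValidaLoop, hL]
          rw [e1, ih2]
        · have e1 : esValidaLoop (c :: rs) 1 (some t)
              = esValidaLoop rs 1 (some (decide (c ∈ pvVocales))) := by
            simp [esValidaLoop, hL, htu]
          rw [e1, ih1, pvHasRun3_cons_ne t _ _ htu]
      · rw [htypes]
        by_cases htu : t = decide (c ∈ pvVocales)
        · subst htu
          have e1 : esValidaLoop (c :: rs) 2 (some (decide (c ∈ pvVocales))) = false := by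
            norm_num [esValidaLoop, hL]
          rw [e1]
          simp [pvHasRun3]
        · have e1 : esValidaLoop (c :: rs) 2 (some t)
              = esValidaLoop rs 1 (some (decide (c ∈ pvVocales))) := by
            simp [esValidaLoop, hL, htu]
          rw [e1, ih1,
            show pvHasRun3 (t :: t :: decide (c ∈ pvVocales) :: pvTypes rs)
                = pvHasRun3 (t :: decide (c ∈ pvVocales) :: pvTypes rs) by
              simp [pvHasRun3, htu],
            pvHasRun3_cons_ne t _ _ htu]
      · rw [htypes]
        have e1 : esValidaLoop (c :: rs) 1 none
            = esValidaLoop rs 1 (some (decide (c ∈ pvVocales))) := by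
          simp [esValidaLoop, hL]
        rw [e1, ih1]
    · have htypes := pvTypes_cons_notLetter c rs hL
      have e1 : ∀ (n : Int) (tipo : Option Bool),
          esValidaLoop (c :: rs) n tipo = esValidaLoop rs n tipo := by
        intro n tipo
        simp [esValidaLoop, hL]
      refine ⟨fun t => ?_, fun t => ?_, ?_⟩ <;>
        rw [htypes, e1] <;> simp [ih1, ih2, ih0]

-- the head character and the start state of A's loop
theorem esValida_core (c0 : Char) (rs : List Char) :
    esValidaLoop rs 1 (pvTipo0 c0) = ! pvHasRun3 (pvTypes (c0 :: rs)) := by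
  obtain ⟨ih1, _, ih0⟩ := esValidaLoop_eq rs
  by_cases hv : c0 ∈ pvVocales
  · have hL : c0 ∈ pvLetras := by simp [pvLetras, hv]
    rw [pvTypes_cons_letter c0 rs hL]
    simp only [pvTipo0]
    rw [if_pos (by simpa using hv), ih1, decide_eq_true hv]
  · by_cases hc : c0 ∈ pvConsonantes
    · have hL : c0 ∈ pvLetras := by simp [pvLetras, hc]
      rw [pvTypes_cons_letter c0 rs hL]
      simp only [pvTipo0]
      rw [if_neg (by simpa using hv), if_pos (by simpa using hc), ih1,
        decide_eq_false hv]
    · have hL : c0 ∉ pvLetras := by simp [pvLetras, hv, hc]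
      rw [pvTypes_cons_notLetter c0 rs hL]
      simp only [pvTipo0]
      rw [if_neg (by simpa using hv), if_neg (by simpa using hc)]
      exact ih0

theorem pvTypes_length_le (l : List Char) : (pvTypes l).length ≤ l.length := by
  simp only [pvTypes, List.length_map]
  exact List.length_filter_le _ _

-- ===== VERDICT (by name: the statement is the Claim_ definition above) =====
theorem es_valida_spec : Claim_equal_es_valida := by
  intro cadena _
  unfold Spec_es_valida es_valida es_valida_alt
  by_cases he : PySem.Str.isIn "e" (PySem.Str.lower cadena) = true
  · rw [if_neg (not_not_intro he), if_neg (not_not_intro he), pvScan_eq]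
    have hlen' := PySem.Str.len_eq cadena
    by_cases hlen : PySem.Str.len cadena < 3
    · rw [if_pos hlen]
      have hl : cadena.toList.length < 3 := by omega
      rw [pvHasRun3_short _ (lt_of_le_of_lt (pvTypes_length_le _) hl)]
      rfl
    · rw [if_neg hlen]
      cases hm : cadena.toList with
      | nil =>
        exfalso
        apply hlen
        rw [hlen', hm]
        norm_num
      | cons c0 rs =>
        exact esValida_core c0 rs
  · rw [if_pos he, if_pos he]
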